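-- pv_equiv track=rewrite | github.com/francoferrerv/Mercado-Libre-Challenge | Minesweeper.py | count_neighbouring_mines
-- ===== SOURCE A (Python) =====
-- def count_neighbouring_mines(original_data):
--
--     if not original_data or not any(original_data):
--         raise ValueError("Input original_data cannot be None or empty")
--
--     rows, columns = len(original_data), len(original_data[0])
--     new_data = [[0] * columns for _ in range(rows)]
--
--     for row in range(rows):
--         for column in range(columns):
--             if original_data[row][column] == 1:
--                 new_data[row][column] = 9
--
--             elif original_data[row][column] == 0:
--                 count = 0
--                 for i in range(-1, 2):
--                     for j in range(-1, 2):
--                         if (0 <= row + i < rows) and (0 <= column + j < columns) and (original_data[row + i][column + j] == 1):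
--                             count += 1
--                 new_data[row][column] = count
--
--     return new_data
-- ===== SOURCE B (Python) =====
-- def count_neighbouring_mines(original_data):
--
--     if not original_data or not any(original_data):
--         raise ValueError("Input original_data cannot be None or empty")
--
--     rows, columns = len(original_data), len(original_data[0])
--
--     # pass 1: per-row horizontal sums of mine indicators over a 3-wide window
--     h = []
--     for row in original_data:
--         ind = [1 if row[c] == 1 else 0 for c in range(columns)]
--         h.append([sum(ind[max(c - 1, 0):c + 2]) for c in range(columns)])
--
--     # pass 2: combine the (up to) three adjacent horizontal-sum rows per cell
--     return [[9 if original_data[r][c] == 1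
--              else sum(h[i][c] for i in range(max(r - 1, 0), min(r + 1, rows - 1) + 1))
--              if original_data[r][c] == 0 else 0
--              for c in range(columns)]
--             for r in range(rows)]
-- ===== Notes on version B (the rewrite author's own statement) =====
-- stated objective: alternative
-- what changed: Replaces A's per-cell 3x3 nested neighbour scan by a separable two-pass convolution: one pass builds per-row 3-wide horizontal window sums of the mine indicators, a second pass obtains each cell's count by adding the (up to) three precomputed horizontal sums above/at/below it.
import Mathlib
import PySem

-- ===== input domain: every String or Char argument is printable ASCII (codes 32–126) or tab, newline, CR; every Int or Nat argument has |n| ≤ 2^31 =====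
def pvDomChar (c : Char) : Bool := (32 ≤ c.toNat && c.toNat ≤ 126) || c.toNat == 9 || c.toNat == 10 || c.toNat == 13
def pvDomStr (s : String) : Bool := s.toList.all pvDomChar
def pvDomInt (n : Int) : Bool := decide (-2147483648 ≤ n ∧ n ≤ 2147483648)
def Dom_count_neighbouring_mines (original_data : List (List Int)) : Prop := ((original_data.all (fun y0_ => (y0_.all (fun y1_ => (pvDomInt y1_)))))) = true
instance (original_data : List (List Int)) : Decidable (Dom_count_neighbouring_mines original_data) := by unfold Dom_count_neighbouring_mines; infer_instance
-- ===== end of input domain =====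

-- B replaces A's per-cell 3×3 scan by a separable two-pass scheme (per-row horizontal
-- window sums, then per-cell sums of up to three precomputed rows): objective 'alternative'.

-- ===== PORT A =====
-- original_data[r][c] (in range wherever A reads under Pre_)
def pvCell (d : List (List Int)) (r c : Int) : Int :=
  PySem.List.pyGetD (PySem.List.pyGetD d r []) c 0

-- A's inner 3×3 counting loop
def pvACount (d : List (List Int)) (rows cols row col : Int) : Int :=
  (PySem.List.pyRange (-1) 2 1).foldl (fun count i =>
    (PySem.List.pyRange (-1) 2 1).foldl (fun count j =>
      if 0 ≤ row + i ∧ row + i < rows ∧ 0 ≤ col + j ∧ col + j < cols ∧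
          pvCell d (row + i) (col + j) = 1
      then count + 1 else count) count) 0

-- new_data[row][column] = v
def pvSetCell (nd : List (List Int)) (r c : Int) (v : Int) : List (List Int) :=
  PySem.List.pySetD nd r (PySem.List.pySetD (PySem.List.pyGetD nd r []) c v)

def count_neighbouring_mines (original_data : List (List Int)) : List (List Int) :=
  -- Python raises ValueError on this branch (outside Pre_)
  if original_data = [] ∨ original_data.all (fun r => r.isEmpty) then []
  else
    let rows : Int := original_data.length
    let cols : Int := (PySem.List.pyGetD original_data 0 []).length
    let new_data : List (List Int) :=
      (PySem.List.pyRange 0 rows 1).map (fun _ => List.replicate cols.toNat 0)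
    (PySem.List.pyRange 0 rows 1).foldl (fun nd row =>
      (PySem.List.pyRange 0 cols 1).foldl (fun nd col =>
        if pvCell original_data row col = 1 then pvSetCell nd row col 9
        else if pvCell original_data row col = 0 then
          pvSetCell nd row col (pvACount original_data rows cols row col)
        else nd) nd) new_data

-- ===== PORT B =====
-- one row of h: 3-wide horizontal window sums of the mine indicators of `row`
def pvHRow (cols : Int) (row : List Int) : List Int :=
  let ind : List Int := (PySem.List.pyRange 0 cols 1).map
    (fun c => if PySem.List.pyGetD row c 0 = 1 then 1 else 0)
  (PySem.List.pyRange 0 cols 1).map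
    (fun c => (PySem.List.slice ind (some (max (c - 1) 0)) (some (c + 2))).sum)

def count_neighbouring_mines_alt (original_data : List (List Int)) : List (List Int) :=
  -- Python raises ValueError on this branch (outside Pre_)
  if original_data = [] ∨ original_data.all (fun r => r.isEmpty) then []
  else
    let rows : Int := original_data.length
    let cols : Int := (PySem.List.pyGetD original_data 0 []).length
    let h : List (List Int) := original_data.map (fun row => pvHRow cols row)
    (PySem.List.pyRange 0 rows 1).map (fun r =>
      (PySem.List.pyRange 0 cols 1).map (fun c =>
        if PySem.List.pyGetD (PySem.List.pyGetD original_data r []) c 0 = 1 then 9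
        else if PySem.List.pyGetD (PySem.List.pyGetD original_data r []) c 0 = 0 then
          ((PySem.List.pyRange (max (r - 1) 0) (min (r + 1) (rows - 1) + 1) 1).map
            (fun i => PySem.List.pyGetD (PySem.List.pyGetD h i []) c 0)).sum
        else 0))

-- ===== PRECONDITION & SPEC =====
-- Pre_ excludes exactly the inputs where the Python A raises: the empty board / all rows
-- empty (ValueError) and boards with a row shorter than len(original_data[0]) (IndexError).
def Pre_count_neighbouring_mines (original_data : List (List Int)) : Prop :=
  (∃ r ∈ original_data, r ≠ []) ∧
    ∀ r ∈ original_data, (original_data.getD 0 []).length ≤ r.length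
instance (original_data : List (List Int)) : Decidable (Pre_count_neighbouring_mines original_data) := by
  unfold Pre_count_neighbouring_mines; infer_instance
def pvWitness_count_neighbouring_mines : List (List Int) := [[1, 0], [0, 0]]

def Spec_count_neighbouring_mines (original_data : List (List Int)) (out : List (List Int)) : Prop := out = count_neighbouring_mines_alt original_data
instance (original_data : List (List Int)) (out : List (List Int)) : Decidable (Spec_count_neighbouring_mines original_data out) := by unfold Spec_count_neighbouring_mines; infer_instance

-- ===== CLAIM (what is proved, stated in full; the proofs are below) =====
def Claim_equal_count_neighbouring_mines : Prop := ∀ (original_data : List (List Int)), Dom_count_neighbouring_mines original_data → Pre_count_neighbouring_mines original_data → Spec_count_neighbouring_mines original_data (count_neighbouring_mines original_data)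

-- ===== LEMMAS AND PROOFS =====

-- the value both programs put at cell (r, c)
def pvOut (d : List (List Int)) (R C r c : Nat) : Int :=
  if pvCell d ↑r ↑c = 1 then 9
  else if pvCell d ↑r ↑c = 0 then pvACount d ↑R ↑C ↑r ↑c
  else 0

-- one fully guarded mine indicator
def pvT (d : List (List Int)) (R C x y : Int) : Int :=
  if 0 ≤ x ∧ x < R ∧ 0 ≤ y ∧ y < C ∧ pvCell d x y = 1 then 1 else 0

-- A's matrix-level update of row r, as a row-level step
def pvRowStep (d : List (List Int)) (R C r : Nat) (row : List Int) (c : Nat) : List Int :=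
  if pvCell d ↑r ↑c = 1 then row.set c 9
  else if pvCell d ↑r ↑c = 0 then row.set c (pvACount d ↑R ↑C ↑r ↑c)
  else row

theorem pv_ite_succ (P : Prop) [Decidable P] (x : Int) :
    (if P then x + 1 else x) = x + (if P then (1:Int) else 0) := by
  split <;> ring

theorem pv_ite_ite (A P : Prop) [Decidable A] [Decidable P] :
    (if A then (if P then (1:Int) else 0) else 0) = if A ∧ P then 1 else 0 := by
  by_cases hA : A <;> simp [hA]

theorem pv_if_congr {P Q : Prop} [Decidable P] [Decidable Q] (h : P ↔ Q) :
    (if P then (1:Int) else 0) = if Q then 1 else 0 := if_congr h rfl rfl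

theorem pv_set_mid (xs ys : List Int) (n : Nat) (v : Int) (h : xs.length = n) :
    (xs ++ ys).set n v = xs ++ ys.set 0 v := by
  subst h; simp

theorem pv_set_mid' (xs : List (List Int)) (ys : List (List Int)) (n : Nat) (v : List Int)
    (h : xs.length = n) : (xs ++ ys).set n v = xs ++ ys.set 0 v := by
  subst h; simp

-- A's 3×3 loop written out as nine guarded indicators
theorem pvACount_eq_terms (d : List (List Int)) (R C row col : Int) :
    pvACount d R C row col =
      pvT d R C (row + -1) (col + -1) + pvT d R C (row + -1) (col + 0) + pvT d R C (row + -1) (col + 1)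
      + pvT d R C (row + 0) (col + -1) + pvT d R C (row + 0) (col + 0) + pvT d R C (row + 0) (col + 1)
      + pvT d R C (row + 1) (col + -1) + pvT d R C (row + 1) (col + 0) + pvT d R C (row + 1) (col + 1) := by
  have hr : PySem.List.pyRange (-1) 2 1 = [-1, 0, 1] := rfl
  unfold pvACount pvT
  rw [hr]
  simp only [List.foldl_cons, List.foldl_nil, pv_ite_succ]
  ring

-- the inner column loop only rewrites row r of the matrix
theorem pv_row_local (d : List (List Int)) (R C : Nat) :
    ∀ (cs : List Nat) (nd : List (List Int)) (r : Nat), r < nd.length →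
      cs.foldl (fun (nd : List (List Int)) (c : Nat) =>
          if pvCell d ↑r ↑c = 1 then nd.set r ((nd.getD r []).set c 9)
          else if pvCell d ↑r ↑c = 0 then
            nd.set r ((nd.getD r []).set c (pvACount d ↑R ↑C ↑r ↑c))
          else nd) nd
      = nd.set r (cs.foldl (pvRowStep d R C r) (nd.getD r [])) := by
  intro cs
  induction cs with
  | nil =>
    intro nd r hr
    simp only [List.foldl_nil]
    rw [List.getD_eq_getElem _ _ hr, List.set_getElem_self]
  | cons c cs ih =>
    intro nd r hr
    simp only [List.foldl_cons]
    by_cases h1 : pvCell d ↑r ↑c = 1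
    · rw [if_pos h1, ih _ r (by simpa using hr)]
      have hg : ((nd.set r ((nd.getD r []).set c 9)).getD r []) = (nd.getD r []).set c 9 := by
        simp [List.getD, List.getElem?_set_self hr]
      rw [hg, List.set_set]
      have : pvRowStep d R C r (nd.getD r []) c = (nd.getD r []).set c 9 := by
        simp [pvRowStep, h1]
      rw [this]
    · by_cases h0 : pvCell d ↑r ↑c = 0
      · rw [if_neg h1, if_pos h0, ih _ r (by simpa using hr)]
        have hg : ((nd.set r ((nd.getD r []).set c (pvACount d ↑R ↑C ↑r ↑c))).getD r [])
            = (nd.getD r []).set c (pvACount d ↑R ↑C ↑r ↑c) := by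
          simp [List.getD, List.getElem?_set_self hr]
        rw [hg, List.set_set]
        have : pvRowStep d R C r (nd.getD r []) c
            = (nd.getD r []).set c (pvACount d ↑R ↑C ↑r ↑c) := by
          simp [pvRowStep, h0]
        rw [this]
      · rw [if_neg h1, if_neg h0, ih _ r hr]
        have : pvRowStep d R C r (nd.getD r []) c = nd.getD r [] := by
          simp [pvRowStep, h1, h0]
        rw [this]

-- the column loop on an all-zeros row computes the row of pvOut values
theorem pv_rowfold (d : List (List Int)) (R C r : Nat) :
    ∀ (n Cl : Nat), n ≤ Cl →
      (List.range n).foldl (pvRowStep d R C r) (List.replicate Cl 0)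
        = (List.range n).map (fun c => pvOut d R C r c) ++ List.replicate (Cl - n) 0 := by
  intro n
  induction n with
  | zero => intro Cl _; simp
  | succ n ih =>
    intro Cl h
    rw [List.range_succ, List.foldl_append, List.foldl_cons, List.foldl_nil,
      ih Cl (by omega)]
    have hsuf : List.replicate (Cl - n) (0:Int) = 0 :: List.replicate (Cl - (n+1)) 0 := by
      have : Cl - n = (Cl - (n+1)) + 1 := by omega
      rw [this, List.replicate_succ]
    have hlen : ((List.range n).map (fun c => pvOut d R C r c)).length = n := by simp
    unfold pvRowStep
    by_cases h1 : pvCell d ↑r ↑n = 1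
    · rw [if_pos h1, hsuf, pv_set_mid _ _ _ _ hlen]
      simp [pvOut, h1, List.map_append]
    · by_cases h0 : pvCell d ↑r ↑n = 0
      · rw [if_neg h1, if_pos h0, hsuf, pv_set_mid _ _ _ _ hlen]
        simp [pvOut, h0, List.map_append]
      · rw [if_neg h1, if_neg h0, hsuf]
        simp [pvOut, h1, h0, List.map_append]

theorem pv_getD_append (xs ys : List (List Int)) (n : Nat) (h : xs.length = n) :
    (xs ++ ys).getD n [] = ys.getD 0 [] := by
  subst h
  simp [List.getD, List.getElem?_append_right]

theorem pv_getD_drop (xs : List (List Int)) (n : Nat) :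
    (xs.drop n).getD 0 [] = xs.getD n [] := by
  simp [List.getD, List.getElem?_drop]

-- the row loop writes row r of the result independently, in order
theorem pv_outer (s : List (List Int) → Nat → List (List Int)) (F : Nat → List Int → List Int)
    (hs : ∀ nd r, r < nd.length → s nd r = nd.set r (F r (nd.getD r []))) :
    ∀ (n : Nat) (nd0 : List (List Int)), n ≤ nd0.length →
      (List.range n).foldl s nd0
        = (List.range n).map (fun r => F r (nd0.getD r [])) ++ nd0.drop n := by
  intro n
  induction n with
  | zero => intro nd0 _; simp
  | succ n ih =>
    intro nd0 h
    rw [List.range_succ, List.foldl_append, List.foldl_cons, List.foldl_nil, ih nd0 (by omega)]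
    have hn : n < nd0.length := by omega
    have hlen1 : ((List.range n).map (fun r => F r (nd0.getD r []))).length = n := by simp
    have hget : ((List.range n).map (fun r => F r (nd0.getD r [])) ++ nd0.drop n).getD n []
        = nd0.getD n [] := by
      rw [pv_getD_append _ _ _ hlen1, pv_getD_drop]
    rw [hs _ n (by simp; omega), hget, pv_set_mid' _ _ _ _ hlen1]
    have hdrop : nd0.drop n = nd0[n] :: nd0.drop (n+1) := List.drop_eq_getElem_cons hn
    rw [hdrop]
    have : nd0.getD n [] = nd0[n] := by rw [List.getD_eq_getElem _ _ hn]
    rw [this]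
    simp [List.map_append, ← this]

-- ===== A-side assembly =====
theorem pvA_eq (d : List (List Int))
    (hg : ¬(d = [] ∨ d.all (fun r => r.isEmpty))) :
    count_neighbouring_mines d
      = (List.range d.length).map (fun r =>
          (List.range (d.getD 0 []).length).map (fun c =>
            pvOut d d.length (d.getD 0 []).length r c)) := by
  set R := d.length with hR
  set C := (d.getD 0 []).length with hC
  unfold count_neighbouring_mines
  rw [if_neg hg]
  simp only [PySem.List.pyGetD_zero, ← hR, ← hC, PySem.List.pyRange_zero_nat,
    Int.toNat_natCast, List.map_map, List.foldl_map, Function.comp_def,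
    pvSetCell, PySem.List.pySetD_natCast, PySem.List.pyGetD_natCast]
  have hlen0 : ((List.range R).map (fun _ => List.replicate C (0:Int))).length = R := by simp
  rw [pv_outer _ (fun r row => (List.range C).foldl (pvRowStep d R C r) row)
      (fun nd r hr => pv_row_local d R C (List.range C) nd r hr) R _ (le_of_eq hlen0.symm)]
  rw [show ((List.range R).map (fun _ => List.replicate C (0:Int))).drop R = [] from by simp]
  rw [List.append_nil]
  apply List.map_congr_left
  intro r hr
  have hnd0 : (((List.range R).map (fun _ => List.replicate C (0:Int))).getD r []) = List.replicate C 0 := by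
    simp [List.getD, List.mem_range.mp hr]
  rw [hnd0, pv_rowfold d R C r C C le_rfl]
  simp

-- ===== B-side lemmas =====

-- slicing a mapped range keeps a mapped subrange
theorem pv_slice_range (f : Int → Int) (C : Nat) (a b : Int)
    (h0 : 0 ≤ a) (hab : a ≤ b) (hbC : b ≤ (C:Int)) :
    PySem.List.slice ((PySem.List.pyRange 0 (C:Int) 1).map f) (some a) (some b)
      = (PySem.List.pyRange a b 1).map f := by
  rw [PySem.List.slice_toNat _ h0 (by omega)]
  rw [PySem.List.pyRange_one_append 0 a (C:Int) h0 (by omega), List.map_append,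
    List.drop_left' (by simp [PySem.List.length_pyRange_one]; try omega)]
  rw [PySem.List.pyRange_one_append a b (C:Int) hab hbC, List.map_append,
    List.take_left' (by simp [PySem.List.length_pyRange_one]; try omega)]

theorem pv_slice_range_hi (f : Int → Int) (C : Nat) (a b : Int)
    (h0 : 0 ≤ a) (haC : a ≤ (C:Int)) (hbC : (C:Int) ≤ b) :
    PySem.List.slice ((PySem.List.pyRange 0 (C:Int) 1).map f) (some a) (some b)
      = (PySem.List.pyRange a (C:Int) 1).map f := by
  rw [PySem.List.slice_toNat _ h0 (by omega)]
  rw [PySem.List.pyRange_one_append 0 a (C:Int) h0 haC, List.map_append,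
    List.drop_left' (by simp [PySem.List.length_pyRange_one]; try omega)]
  rw [List.take_of_length_le (by simp [PySem.List.length_pyRange_one]; try omega)]

-- a range of at most three consecutive integers, summed slot by slot
theorem pv_sumRange3 (f : Int → Int) (a b : Int) (h : b ≤ a + 1 + 1 + 1) :
    ((PySem.List.pyRange a b 1).map f).sum
      = (if a < b then f a else 0) + (if a + 1 < b then f (a + 1) else 0)
        + (if a + 1 + 1 < b then f (a + 1 + 1) else 0) := by
  by_cases h1 : a < b
  · rw [PySem.List.pyRange_one_cons h1]
    by_cases h2 : a + 1 < b
    · rw [PySem.List.pyRange_one_cons h2]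
      by_cases h3 : a + 1 + 1 < b
      · rw [PySem.List.pyRange_one_cons h3,
          PySem.List.pyRange_one_eq_nil (show b ≤ a + 1 + 1 + 1 from h)]
        simp [h1, h2, h3]
        try ring
      · rw [PySem.List.pyRange_one_eq_nil (show b ≤ a + 1 + 1 from by omega)]
        simp [h1, h2, h3]
        try ring
    · rw [PySem.List.pyRange_one_eq_nil (show b ≤ a + 1 from by omega)]
      simp [h1, h2, show ¬(a + 1 + 1 < b) from by omega]
  · rw [PySem.List.pyRange_one_eq_nil (show b ≤ a from by omega)]
    simp [h1, show ¬(a + 1 < b) from by omega, show ¬(a + 1 + 1 < b) from by omega]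

-- the same sum, recentred on the window around c
theorem pv_sum3 (f : Int → Int) (c a b : Int)
    (ha : c - 1 ≤ a) (hb : b ≤ c + 2) (hab : a ≤ b) :
    ((PySem.List.pyRange a b 1).map f).sum
      = (if a ≤ c - 1 ∧ c - 1 < b then f (c - 1) else 0)
      + (if a ≤ c ∧ c < b then f c else 0)
      + (if a ≤ c + 1 ∧ c + 1 < b then f (c + 1) else 0) := by
  rw [pv_sumRange3 f a b (by omega)]
  rcases (show a = c - 1 ∨ a = c ∨ a = c + 1 ∨ a = c + 2 from by omega) with h | h | h | h <;>
    subst h <;> split_ifs <;> (first | (exfalso; omega) | ring1 | ring_nf)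

-- one h-cell is the sum of the three guarded horizontal indicators
theorem pv_hrow (C : Nat) (row : List Int) (c : Nat) (hc : c < C) :
    PySem.List.pyGetD (pvHRow (C:Int) row) (c:Int) 0 =
      (if 0 ≤ (c:Int) + -1 ∧ (c:Int) + -1 < (C:Int) ∧ PySem.List.pyGetD row ((c:Int) + -1) 0 = 1 then (1:Int) else 0)
      + (if 0 ≤ (c:Int) + 0 ∧ (c:Int) + 0 < (C:Int) ∧ PySem.List.pyGetD row ((c:Int) + 0) 0 = 1 then (1:Int) else 0)
      + (if 0 ≤ (c:Int) + 1 ∧ (c:Int) + 1 < (C:Int) ∧ PySem.List.pyGetD row ((c:Int) + 1) 0 = 1 then (1:Int) else 0) := by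
  simp only [pvHRow]
  rw [PySem.List.pyGetD_map_pyRange _ C c 0 hc]
  rw [show (c:Int) + -1 = (c:Int) - 1 from by ring, show (c:Int) + 0 = (c:Int) from by ring]
  by_cases hE : (c:Int) + 2 ≤ (C:Int)
  · rw [pv_slice_range (fun j => if PySem.List.pyGetD row j 0 = 1 then (1:Int) else 0) C
        (max ((c:Int) - 1) 0) ((c:Int) + 2) (by omega) (by omega) hE]
    rw [pv_sum3 (fun j => if PySem.List.pyGetD row j 0 = 1 then (1:Int) else 0) (c:Int)
        (max ((c:Int) - 1) 0) ((c:Int) + 2) (by omega) (by omega) (by omega)]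
    simp only [pv_ite_ite]
    refine congrArg₂ (· + ·) (congrArg₂ (· + ·) ?_ ?_) ?_
    · exact pv_if_congr (by
        constructor
        · rintro ⟨⟨h1, h2⟩, h3⟩
          exact ⟨by omega, by omega, h3⟩
        · rintro ⟨h1, h2, h3⟩
          exact ⟨⟨by omega, by omega⟩, h3⟩)
    · exact pv_if_congr (by
        constructor
        · rintro ⟨⟨h1, h2⟩, h3⟩
          exact ⟨by omega, by omega, h3⟩
        · rintro ⟨h1, h2, h3⟩
          exact ⟨⟨by omega, by omega⟩, h3⟩)
    · exact pv_if_congr (by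
        constructor
        · rintro ⟨⟨h1, h2⟩, h3⟩
          exact ⟨by omega, by omega, h3⟩
        · rintro ⟨h1, h2, h3⟩
          exact ⟨⟨by omega, by omega⟩, h3⟩)
  · rw [pv_slice_range_hi (fun j => if PySem.List.pyGetD row j 0 = 1 then (1:Int) else 0) C
        (max ((c:Int) - 1) 0) ((c:Int) + 2) (by omega) (by omega) (by omega)]
    rw [pv_sum3 (fun j => if PySem.List.pyGetD row j 0 = 1 then (1:Int) else 0) (c:Int)
        (max ((c:Int) - 1) 0) (C:Int) (by omega) (by omega) (by omega)]
    simp only [pv_ite_ite]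
    refine congrArg₂ (· + ·) (congrArg₂ (· + ·) ?_ ?_) ?_
    · exact pv_if_congr (by
        constructor
        · rintro ⟨⟨h1, h2⟩, h3⟩
          exact ⟨by omega, by omega, h3⟩
        · rintro ⟨h1, h2, h3⟩
          exact ⟨⟨by omega, by omega⟩, h3⟩)
    · exact pv_if_congr (by
        constructor
        · rintro ⟨⟨h1, h2⟩, h3⟩
          exact ⟨by omega, by omega, h3⟩
        · rintro ⟨h1, h2, h3⟩
          exact ⟨⟨by omega, by omega⟩, h3⟩)
    · exact pv_if_congr (by
        constructor
        · rintro ⟨⟨h1, h2⟩, h3⟩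
          exact ⟨by omega, by omega, h3⟩
        · rintro ⟨h1, h2, h3⟩
          exact ⟨⟨by omega, by omega⟩, h3⟩)

-- one h-cell read through h = map pvHRow, with full matrix guards
theorem pv_hval (d : List (List Int)) (C : Nat) (i : Int) (c : Nat)
    (h0 : 0 ≤ i) (hiR : i < (d.length : Int)) (hc : c < C) :
    PySem.List.pyGetD (PySem.List.pyGetD (d.map (fun row => pvHRow (C:Int) row)) i []) (c:Int) 0 =
      pvT d (d.length : Int) (C:Int) i ((c:Int) + -1)
      + pvT d (d.length : Int) (C:Int) i ((c:Int) + 0)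
      + pvT d (d.length : Int) (C:Int) i ((c:Int) + 1) := by
  have hi : i.toNat < d.length := by omega
  rw [PySem.List.pyGetD_of_nonneg _ _ h0]
  have hmap : (d.map (fun row => pvHRow (C:Int) row)).getD i.toNat []
      = pvHRow (C:Int) (d.getD i.toNat []) := by
    simp [List.getD, hi]
  rw [hmap, pv_hrow C _ c hc]
  unfold pvT
  simp only [pvCell, PySem.List.pyGetD_of_nonneg _ _ h0]
  refine congrArg₂ (· + ·) (congrArg₂ (· + ·) ?_ ?_) ?_
  · exact pv_if_congr (by
      constructor
      · rintro ⟨h1, h2, h3⟩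
        exact ⟨by omega, by omega, h1, h2, h3⟩
      · rintro ⟨-, -, h1, h2, h3⟩
        exact ⟨h1, h2, h3⟩)
  · exact pv_if_congr (by
      constructor
      · rintro ⟨h1, h2, h3⟩
        exact ⟨by omega, by omega, h1, h2, h3⟩
      · rintro ⟨-, -, h1, h2, h3⟩
        exact ⟨h1, h2, h3⟩)
  · exact pv_if_congr (by
      constructor
      · rintro ⟨h1, h2, h3⟩
        exact ⟨by omega, by omega, h1, h2, h3⟩
      · rintro ⟨-, -, h1, h2, h3⟩
        exact ⟨h1, h2, h3⟩)

-- the vertical pass equals A's 3×3 count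
theorem pv_vert (d : List (List Int)) (C r c : Nat)
    (hr : r < d.length) (hc : c < C) :
    ((PySem.List.pyRange (max ((r:Int) - 1) 0) (min ((r:Int) + 1) ((d.length:Int) - 1) + 1) 1).map
        (fun i => PySem.List.pyGetD
          (PySem.List.pyGetD (d.map (fun row => pvHRow (C:Int) row)) i []) (c:Int) 0)).sum
      = pvACount d (d.length:Int) (C:Int) (r:Int) (c:Int) := by
  rw [pvACount_eq_terms]
  simp only [show (r:Int) + -1 = (r:Int) - 1 from by ring, show (r:Int) + 0 = (r:Int) from by ring]
  by_cases h0r : r = 0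
  · by_cases h1R : d.length = 1
    · rw [show max ((r:Int) - 1) 0 = (r:Int) from by omega,
        show min ((r:Int) + 1) ((d.length:Int) - 1) + 1 = (r:Int) + 1 from by omega,
        PySem.List.pyRange_one_singleton]
      simp only [List.map_cons, List.map_nil, List.sum_cons, List.sum_nil]
      rw [pv_hval d C ((r:Int)) c (by omega) (by omega) hc]
      have hd1 : ∀ y : Int, pvT d (d.length:Int) (C:Int) ((r:Int) - 1) y = 0 := by
        intro y; unfold pvT
        exact if_neg (by rintro ⟨h1, -, -⟩; omega)
      have hd2 : ∀ y : Int, pvT d (d.length:Int) (C:Int) ((r:Int) + 1) y = 0 := by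
        intro y; unfold pvT
        exact if_neg (by rintro ⟨-, h2, -⟩; omega)
      simp only [hd1, hd2]
      ring
    · rw [show max ((r:Int) - 1) 0 = (r:Int) from by omega,
        show min ((r:Int) + 1) ((d.length:Int) - 1) + 1 = (r:Int) + 1 + 1 from by omega,
        PySem.List.pyRange_one_cons (show ((r:Int)) < (r:Int) + 1 + 1 from by omega),
        PySem.List.pyRange_one_singleton]
      simp only [List.map_cons, List.map_nil, List.sum_cons, List.sum_nil]
      rw [pv_hval d C ((r:Int)) c (by omega) (by omega) hc,
        pv_hval d C ((r:Int) + 1) c (by omega) (by omega) hc]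
      have hd1 : ∀ y : Int, pvT d (d.length:Int) (C:Int) ((r:Int) - 1) y = 0 := by
        intro y; unfold pvT
        exact if_neg (by rintro ⟨h1, -, -⟩; omega)
      simp only [hd1]
      ring
  · by_cases hlast : r + 1 = d.length
    · rw [show max ((r:Int) - 1) 0 = (r:Int) - 1 from by omega,
        show min ((r:Int) + 1) ((d.length:Int) - 1) + 1 = (r:Int) + 1 from by omega,
        PySem.List.pyRange_one_cons (show ((r:Int)) - 1 < (r:Int) + 1 from by omega),
        show ((r:Int)) - 1 + 1 = (r:Int) from by ring,
        PySem.List.pyRange_one_singleton]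
      simp only [List.map_cons, List.map_nil, List.sum_cons, List.sum_nil]
      rw [pv_hval d C ((r:Int) - 1) c (by omega) (by omega) hc,
        pv_hval d C ((r:Int)) c (by omega) (by omega) hc]
      have hd2 : ∀ y : Int, pvT d (d.length:Int) (C:Int) ((r:Int) + 1) y = 0 := by
        intro y; unfold pvT
        exact if_neg (by rintro ⟨-, h2, -⟩; omega)
      simp only [hd2]
      ring
    · rw [show max ((r:Int) - 1) 0 = (r:Int) - 1 from by omega,
        show min ((r:Int) + 1) ((d.length:Int) - 1) + 1 = (r:Int) + 1 + 1 from by omega,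
        PySem.List.pyRange_one_cons (show ((r:Int)) - 1 < (r:Int) + 1 + 1 from by omega),
        show ((r:Int)) - 1 + 1 = (r:Int) from by ring,
        PySem.List.pyRange_one_cons (show ((r:Int)) < (r:Int) + 1 + 1 from by omega),
        PySem.List.pyRange_one_singleton]
      simp only [List.map_cons, List.map_nil, List.sum_cons, List.sum_nil]
      rw [pv_hval d C ((r:Int) - 1) c (by omega) (by omega) hc,
        pv_hval d C ((r:Int)) c (by omega) (by omega) hc,
        pv_hval d C ((r:Int) + 1) c (by omega) (by omega) hc]
      ring

-- ===== B-side assembly =====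
theorem pvB_eq (d : List (List Int))
    (hg : ¬(d = [] ∨ d.all (fun r => r.isEmpty))) :
    count_neighbouring_mines_alt d
      = (List.range d.length).map (fun r =>
          (List.range (d.getD 0 []).length).map (fun c =>
            pvOut d d.length (d.getD 0 []).length r c)) := by
  set R := d.length with hR
  set C := (d.getD 0 []).length with hC
  unfold count_neighbouring_mines_alt
  rw [if_neg hg]
  simp only [PySem.List.pyGetD_zero, ← hR, ← hC, PySem.List.pyRange_zero_nat, List.map_map,
    Function.comp_def]
  apply List.map_congr_left
  intro r hr
  apply List.map_congr_left
  intro c hc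
  rw [show PySem.List.pyGetD (PySem.List.pyGetD d (r:Int) []) (c:Int) 0 = pvCell d (r:Int) (c:Int) from rfl]
  unfold pvOut
  by_cases h1 : pvCell d (r:Int) (c:Int) = 1
  · rw [if_pos h1, if_pos h1]
  · rw [if_neg h1, if_neg h1]
    by_cases h0 : pvCell d (r:Int) (c:Int) = 0
    · rw [if_pos h0, if_pos h0]
      exact pv_vert d C r c (List.mem_range.mp hr) (List.mem_range.mp hc)
    · rw [if_neg h0, if_neg h0]

-- ===== VERDICT (by name: the statement is the Claim_ definition above) =====
theorem count_neighbouring_mines_spec : Claim_equal_count_neighbouring_mines := by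
  intro d _ hpre
  unfold Spec_count_neighbouring_mines
  by_cases hg : d = [] ∨ d.all (fun r => r.isEmpty)
  · unfold count_neighbouring_mines count_neighbouring_mines_alt
    rw [if_pos hg, if_pos hg]
  · rw [pvA_eq d hg, pvB_eq d hg]
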